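-- pv_equiv track=rewrite | github.com/wangpeipei90/CodeJam | Sums.py | newArray
-- ===== SOURCE A (Python) =====
-- def newArray(arr,n):
--     newArr=[]
--     for i in range(n):
--         sum=0
--         for j in range(i,n):
--             sum+=arr[j]
--             newArr.append(sum)
--     newArr.sort()
--     return newArr
-- ===== SOURCE B (Python) =====
-- def newArray(arr, n):
--     prefix = [0]
--     for k in range(n):
--         prefix.append(prefix[k] + arr[k])
--     sums = []
--     for i in range(n):
--         for j in range(i + 1, n + 1):
--             sums.append(prefix[j] - prefix[i])
--     sums.sort()
--     return sums
-- ===== Notes on version B (the rewrite author's own statement) =====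
-- stated objective: alternative
-- what changed: B precomputes a prefix-sum table once and obtains each contiguous-subarray sum as a subtraction prefix[j]-prefix[i], instead of restarting a running accumulator at every start index as A does.
import Mathlib
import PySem

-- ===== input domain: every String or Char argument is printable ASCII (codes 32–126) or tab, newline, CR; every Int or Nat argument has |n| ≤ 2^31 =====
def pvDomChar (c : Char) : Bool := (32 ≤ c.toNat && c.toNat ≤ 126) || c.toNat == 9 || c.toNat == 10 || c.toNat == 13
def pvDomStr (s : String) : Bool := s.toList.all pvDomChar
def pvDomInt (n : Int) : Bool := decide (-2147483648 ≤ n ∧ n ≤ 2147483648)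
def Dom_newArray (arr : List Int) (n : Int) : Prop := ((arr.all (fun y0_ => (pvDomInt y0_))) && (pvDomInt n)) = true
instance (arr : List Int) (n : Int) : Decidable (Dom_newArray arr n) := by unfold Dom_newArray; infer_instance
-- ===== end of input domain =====

-- B replaces A's per-start running accumulator by a prefix-sum table with subtraction (alternative decomposition, same cost).


-- ===== PORT A =====
def newArray (arr : List Int) (n : Int) : List Int :=
  let newArr :=
    (PySem.List.pyRange 0 n 1).foldl (fun newArr i =>
      ((PySem.List.pyRange i n 1).foldl
        (fun (st : Int × List Int) j =>
          let s := st.1 + PySem.List.pyGetD arr j 0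
          (s, st.2 ++ [s]))
        (0, newArr)).2) []
  PySem.List.sorted newArr (fun x => x)

-- ===== PORT B =====
def newArray_alt (arr : List Int) (n : Int) : List Int :=
  let prefix_ :=
    (PySem.List.pyRange 0 n 1).foldl (fun p k =>
      p ++ [PySem.List.pyGetD p k 0 + PySem.List.pyGetD arr k 0]) [0]
  let sums :=
    (PySem.List.pyRange 0 n 1).foldl (fun sums i =>
      (PySem.List.pyRange (i + 1) (n + 1) 1).foldl
        (fun sums j => sums ++ [PySem.List.pyGetD prefix_ j 0 - PySem.List.pyGetD prefix_ i 0])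
        sums) []
  PySem.List.sorted sums (fun x => x)

-- ===== PRECONDITION & SPEC =====
-- Pre_ excludes n > len(arr), on which Python A raises IndexError (arr[j] with j ≥ len(arr)).
def Pre_newArray (arr : List Int) (n : Int) : Prop := n ≤ (arr.length : Int)
instance (arr : List Int) (n : Int) : Decidable (Pre_newArray arr n) := by unfold Pre_newArray; infer_instance
def pvWitness_newArray : List Int × Int := ([3, -1, 2], 3)
def Spec_newArray (arr : List Int) (n : Int) (out : List Int) : Prop := out = newArray_alt arr n
instance (arr : List Int) (n : Int) (out : List Int) : Decidable (Spec_newArray arr n out) := by unfold Spec_newArray; infer_instance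

-- ===== CLAIM (what is proved, stated in full; the proofs are below) =====
def Claim_equal_newArray : Prop := ∀ (arr : List Int) (n : Int), Dom_newArray arr n → Pre_newArray arr n → Spec_newArray arr n (newArray arr n)

-- ===== LEMMAS AND PROOFS =====

-- sum of the first i defaulted elements (proof-side characterisation of B's prefix table)
def pvS (arr : List Int) (i : Int) : Int :=
  ((PySem.List.pyRange 0 i 1).map (fun j => PySem.List.pyGetD arr j 0)).sum

theorem pvS_succ (arr : List Int) (m : Int) (hm : 0 ≤ m) :
    pvS arr (m + 1) = pvS arr m + PySem.List.pyGetD arr m 0 := by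
  unfold pvS
  rw [PySem.List.pyRange_one_succ_right hm]
  simp

-- A's inner loop: running-sum fold characterised as a map of prefix differences
theorem innerA_eq (arr : List Int) (i : Int) (hi : 0 ≤ i) :
    ∀ (m : Int), i ≤ m → ∀ (c : Int) (acc : List Int),
      (PySem.List.pyRange i m 1).foldl
        (fun (st : Int × List Int) j =>
          let s := st.1 + PySem.List.pyGetD arr j 0
          (s, st.2 ++ [s])) (c, acc)
      = (c + (pvS arr m - pvS arr i),
         acc ++ (PySem.List.pyRange i m 1).map (fun j => c + (pvS arr (j + 1) - pvS arr i))) := by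
  intro m hm
  induction m, hm using Int.le_induction with
  | base =>
    intro c acc
    simp [PySem.List.pyRange_one_eq_nil le_rfl]
  | succ m hm ih =>
    intro c acc
    rw [PySem.List.pyRange_one_succ_right hm, List.foldl_append, ih c acc, List.map_append]
    simp only [List.foldl_cons, List.foldl_nil, List.map_cons, List.map_nil, List.append_assoc]
    rw [pvS_succ arr m (le_trans hi hm)]
    have hc : c + (pvS arr m - pvS arr i) + PySem.List.pyGetD arr m 0
        = c + (pvS arr m + PySem.List.pyGetD arr m 0 - pvS arr i) := by ring
    rw [hc]

-- B's prefix table equals the map of pvS over 0..m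
theorem prefix_eq (arr : List Int) :
    ∀ (m : Int), 0 ≤ m →
      (PySem.List.pyRange 0 m 1).foldl (fun p k =>
        p ++ [PySem.List.pyGetD p k 0 + PySem.List.pyGetD arr k 0]) [0]
      = (List.range (m.toNat + 1)).map (fun k : Nat => pvS arr (k : Int)) := by
  intro m hm
  induction m, hm using Int.le_induction with
  | base =>
    simp [PySem.List.pyRange_one_eq_nil le_rfl, pvS, List.range_succ]
  | succ m hm ih =>
    rw [PySem.List.pyRange_one_succ_right hm, List.foldl_append, ih]
    simp only [List.foldl_cons, List.foldl_nil]
    have hlen : ((List.range (m.toNat + 1)).map (fun k : Nat => pvS arr (k : Int))).length = m.toNat + 1 := by simp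
    have hget : PySem.List.pyGetD ((List.range (m.toNat + 1)).map (fun k : Nat => pvS arr (k : Int))) m 0 = pvS arr m := by
      rw [PySem.List.pyGetD_eq_getElem _ 0 hm (by rw [hlen]; omega)]
      rw [List.getElem_map, List.getElem_range]
      congr 1
      omega
    rw [hget]
    have : (m + 1).toNat + 1 = (m.toNat + 1) + 1 := by omega
    have hmap : List.map (fun k : Nat => pvS arr (k : Int)) (List.range (m.toNat + 1 + 1))
        = List.map (fun k : Nat => pvS arr (k : Int)) (List.range (m.toNat + 1))
          ++ [pvS arr ((m.toNat + 1 : Nat) : Int)] := by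
      rw [List.range_succ, List.map_append]; rfl
    rw [this, hmap, show ((m.toNat + 1 : Nat) : Int) = m + 1 by omega, pvS_succ arr m hm]

theorem prefix_get (arr : List Int) (m j : Int) (h0 : 0 ≤ j) (hj : j ≤ m) (hm : 0 ≤ m) :
    PySem.List.pyGetD ((PySem.List.pyRange 0 m 1).foldl (fun p k =>
        p ++ [PySem.List.pyGetD p k 0 + PySem.List.pyGetD arr k 0]) [0]) j 0 = pvS arr j := by
  rw [prefix_eq arr m hm]
  rw [PySem.List.pyGetD_eq_getElem _ 0 h0 (by simp; omega)]
  rw [List.getElem_map, List.getElem_range]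
  congr 1
  omega

-- shift of the index range: A's segment at i equals B's segment at i
theorem seg_shift (arr : List Int) (i n : Int) :
    (PySem.List.pyRange i n 1).map (fun j => 0 + (pvS arr (j + 1) - pvS arr i))
    = (PySem.List.pyRange (i + 1) (n + 1) 1).map (fun j => pvS arr j - pvS arr i) := by
  rw [PySem.List.pyRange_one, PySem.List.pyRange_one, List.map_map, List.map_map]
  have : n + 1 - (i + 1) = n - i := by ring
  rw [this]
  apply List.map_congr_left
  intro k _
  simp
  ring_nf

theorem newArray_eq_core (arr : List Int) (n : Int) :
    newArray arr n = newArray_alt arr n := by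
  unfold newArray newArray_alt
  simp only []
  congr 1
  apply PySem.List.foldl_congr_mem
  intro acc i hi
  have hmem := (PySem.List.mem_pyRange_one).1 hi
  have hi0 : (0 : Int) ≤ i := hmem.1
  have hin : i < n := hmem.2
  rw [innerA_eq arr i hi0 n (le_of_lt hin) 0 acc]
  rw [PySem.List.foldl_append_singleton_eq_map]
  simp only []
  rw [seg_shift arr i n]
  congr 1
  apply List.map_congr_left
  intro j hj
  have hjm := (PySem.List.mem_pyRange_one).1 hj
  rw [prefix_get arr n j (by omega) (by omega) (by omega),
      prefix_get arr n i (by omega) (by omega) (by omega)]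

-- ===== VERDICT (by name: the statement is the Claim_ definition above) =====
theorem newArray_spec : Claim_equal_newArray := by
  intro arr n _ _
  unfold Spec_newArray
  exact newArray_eq_core arr n
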